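-- pv_equiv track=rewrite | github.com/jslee2018/SCAMOL | SCAN/scan_graph_v2.py | convert_to_labels
-- ===== SOURCE A (Python) =====
-- def convert_to_labels(node_list, cluster_data):
--     labels = [-1] * len(node_list)  # Default label for nodes not found in clusters
--     node_index = {node: idx for idx, node in enumerate(node_list)}
--     for cluster_id, nodes in cluster_data.items():
--         for node in nodes:
--             if node in node_index:  # Check if node is in the graph
--                 labels[node_index[node]] = cluster_id
--     return labels
-- ===== SOURCE B (Python) =====
-- def convert_to_labels(node_list, cluster_data):
--     # Invert the cluster table once (last cluster wins, like A's overwrite),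
--     # then drive the output from the node index joined against it.
--     node_to_cluster = {node: cid for cid, nodes in cluster_data.items() for node in nodes}
--     node_index = {node: idx for idx, node in enumerate(node_list)}
--     labels = [-1] * len(node_list)
--     for node, idx in node_index.items():
--         if node in node_to_cluster:
--             labels[idx] = node_to_cluster[node]
--     return labels
-- ===== Notes on version B (the rewrite author's own statement) =====
-- stated objective: alternative
-- what changed: Instead of mutating labels inside a nested scan over clusters, B first inverts cluster_data into a node->cluster map (last cluster wins) and builds the node index, then fills labels in one pass over the node index joined against that map.
import Mathlib
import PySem

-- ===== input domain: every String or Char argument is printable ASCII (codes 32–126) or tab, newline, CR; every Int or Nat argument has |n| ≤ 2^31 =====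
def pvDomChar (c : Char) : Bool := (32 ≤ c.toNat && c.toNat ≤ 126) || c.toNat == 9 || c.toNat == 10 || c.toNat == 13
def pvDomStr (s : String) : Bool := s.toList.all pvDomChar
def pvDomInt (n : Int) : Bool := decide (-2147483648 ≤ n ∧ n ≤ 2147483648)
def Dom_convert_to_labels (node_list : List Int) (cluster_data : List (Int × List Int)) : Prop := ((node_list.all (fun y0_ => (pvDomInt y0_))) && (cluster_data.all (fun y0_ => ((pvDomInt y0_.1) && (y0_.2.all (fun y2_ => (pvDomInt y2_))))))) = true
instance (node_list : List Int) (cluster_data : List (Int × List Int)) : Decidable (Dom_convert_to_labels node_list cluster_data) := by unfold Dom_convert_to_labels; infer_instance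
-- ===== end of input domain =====

-- B inverts cluster_data into a node->cluster map and fills labels in one pass over the
-- node index joined against it (alternative decomposition, same cost).

-- ===== PORT A =====
-- shared helper: both Pythons contain the line `node_index = {node: idx for idx, node in enumerate(node_list)}`
def pvNodeIndex (node_list : List Int) : PySem.Dict Int Int :=
  (PySem.List.enumerate node_list).foldl (fun d p => d.insert p.2 p.1) PySem.Dict.empty

def convert_to_labels (node_list : List Int) (cluster_data : List (Int × List Int)) : List Int :=
  let labels := List.replicate node_list.length (-1 : Int)
  let node_index := pvNodeIndex node_list
  let cd := PySem.Dict.ofList cluster_data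
  cd.items.foldl (fun labels p =>
    p.2.foldl (fun labels node =>
      if node_index.contains node then
        PySem.List.pySetD labels (node_index.getD node 0) p.1
      else labels) labels) labels

-- ===== PORT B =====
def convert_to_labels_alt (node_list : List Int) (cluster_data : List (Int × List Int)) : List Int :=
  let cd := PySem.Dict.ofList cluster_data
  let node_to_cluster : PySem.Dict Int Int :=
    cd.items.foldl (fun m p => p.2.foldl (fun m node => m.insert node p.1) m) PySem.Dict.empty
  let node_index := pvNodeIndex node_list
  let labels := List.replicate node_list.length (-1 : Int)
  node_index.items.foldl (fun labels p =>
    if node_to_cluster.contains p.1 then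
      PySem.List.pySetD labels p.2 (node_to_cluster.getD p.1 0)
    else labels) labels

-- ===== PRECONDITION & SPEC =====
def Spec_convert_to_labels (node_list : List Int) (cluster_data : List (Int × List Int)) (out : List Int) : Prop := out = convert_to_labels_alt node_list cluster_data
instance (node_list : List Int) (cluster_data : List (Int × List Int)) (out : List Int) : Decidable (Spec_convert_to_labels node_list cluster_data out) := by unfold Spec_convert_to_labels; infer_instance

-- ===== CLAIM (what is proved, stated in full; the proofs are below) =====
def Claim_equal_convert_to_labels : Prop := ∀ (node_list : List Int) (cluster_data : List (Int × List Int)), Dom_convert_to_labels node_list cluster_data → Spec_convert_to_labels node_list cluster_data (convert_to_labels node_list cluster_data)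

-- ===== LEMMAS AND PROOFS =====

-- extensionality through getD
lemma pv_ext (l1 l2 : List Int) (h : l1.length = l2.length)
    (hg : ∀ j, j < l1.length → l1.getD j 0 = l2.getD j 0) : l1 = l2 := by
  apply List.ext_getElem h
  intro j hj1 hj2
  rw [← List.getD_eq_getElem l1 0 hj1, ← List.getD_eq_getElem l2 0 hj2]
  exact hg j hj1

lemma pv_getD_set (l : List Int) (k j : Nat) (v : Int) (hk : k < l.length) :
    (l.set k v).getD j 0 = if k = j then v else l.getD j 0 := by
  rw [List.getD_eq_getElem?_getD, List.getD_eq_getElem?_getD, List.getElem?_set]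
  split
  · next h => subst h; simp
  · rfl

-- a nested fold over (key, list) pairs is a fold over the flattened (key, element) pairs
lemma pv_foldl_nested {α β γ : Type} (l : List (β × List γ)) (f : α → β × γ → α) (init : α) :
    l.foldl (fun acc p => p.2.foldl (fun acc x => f acc (p.1, x)) acc) init
      = (l.flatMap (fun p => p.2.map (fun x => (p.1, x)))).foldl f init := by
  induction l generalizing init with
  | nil => rfl
  | cons p t ih => simp [List.foldl_append, List.foldl_map, ih]

lemma pv_get?_foldl_insert (ps : List (Int × Int)) (d0 : PySem.Dict Int Int) (x i : Int)
    (h : (ps.foldl (fun d p => d.insert p.2 p.1) d0).get? x = some i) :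
    (i, x) ∈ ps ∨ d0.get? x = some i := by
  induction ps generalizing d0 with
  | nil => exact Or.inr h
  | cons p t ih =>
    rcases ih _ h with hm | hd
    · exact Or.inl (List.mem_cons_of_mem _ hm)
    · rw [PySem.Dict.get?_insert] at hd
      split at hd
      · cases hd; left; simp_all
      · exact Or.inr hd

-- get? of the node index yields a valid last-occurrence index
lemma pv_nodeIndex_get? (nl : List Int) (x i : Int)
    (h : (pvNodeIndex nl).get? x = some i) :
    ∃ k : Nat, i = (k : Int) ∧ k < nl.length ∧ nl.getD k 0 = x := by
  rcases pv_get?_foldl_insert _ _ _ _ h with hm | hd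
  · rw [PySem.List.mem_enumerate_iff] at hm
    rcases hm with ⟨k, hk, hp⟩
    refine ⟨k, ?_, hk, ?_⟩
    · simpa using congrArg Prod.fst hp
    · have h2 : x = nl[k] := by simpa using congrArg Prod.snd hp
      rw [List.getD_eq_getElem nl 0 hk, h2]
  · simp [PySem.Dict.get?_empty] at hd

lemma pv_nodeIndex_keys (nl : List Int) : (pvNodeIndex nl).keys = PySem.Set.ofList nl := by
  unfold pvNodeIndex
  rw [PySem.Dict.keys_foldl_insert_key (key := Prod.snd) (f := fun _ p => p.1)]
  simp [PySem.List.map_snd_enumerate, PySem.Dict.keys_empty, PySem.Set.update, PySem.Set.ofList_eq_foldl]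

lemma pv_nodeIndex_contains (nl : List Int) (x : Int) :
    (pvNodeIndex nl).contains x = decide (x ∈ nl) := by
  rw [PySem.Dict.contains_eq_decide_mem_keys, pv_nodeIndex_keys]
  simp [PySem.Set.mem_ofList]

lemma pv_nodeIndex_nodup (nl : List Int) : (pvNodeIndex nl).keys.Nodup := by
  rw [pv_nodeIndex_keys]; exact PySem.Set.nodup_ofList nl

-- the pointwise description both loops converge to
def pvLab (nl : List Int) (m : PySem.Dict Int Int) : List Int :=
  (List.range nl.length).map (fun j =>
    if (pvNodeIndex nl).get? (nl.getD j 0) = some (j : Int) ∧ m.contains (nl.getD j 0) = true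
    then m.getD (nl.getD j 0) 0 else -1)

lemma pvLab_length (nl : List Int) (m : PySem.Dict Int Int) : (pvLab nl m).length = nl.length := by
  simp [pvLab]

lemma pvLab_empty (nl : List Int) : pvLab nl PySem.Dict.empty = List.replicate nl.length (-1) := by
  simp [pvLab, PySem.Dict.contains_empty]

lemma pvLab_getD (nl : List Int) (m : PySem.Dict Int Int) (j : Nat) (hj : j < nl.length) :
    (pvLab nl m).getD j 0 =
      if (pvNodeIndex nl).get? (nl.getD j 0) = some (j : Int) ∧ m.contains (nl.getD j 0) = true
      then m.getD (nl.getD j 0) 0 else -1 := by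
  rw [List.getD_eq_getElem _ 0 (by simpa [pvLab_length] using hj)]
  simp [pvLab, hj]

-- one A-step on pvLab m is pvLab (m.insert …)
lemma pv_stepA (nl : List Int) (m : PySem.Dict Int Int) (c x : Int) :
    (if (pvNodeIndex nl).contains x then
        PySem.List.pySetD (pvLab nl m) ((pvNodeIndex nl).getD x 0) c
      else pvLab nl m) = pvLab nl (m.insert x c) := by
  by_cases hc : (pvNodeIndex nl).contains x = true
  · rw [if_pos hc]
    have hsome : ∃ i, (pvNodeIndex nl).get? x = some i := by
      rcases h : (pvNodeIndex nl).get? x with _ | i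
      · rw [PySem.Dict.contains_eq_isSome_get?, h] at hc; simp at hc
      · exact ⟨i, rfl⟩
    rcases hsome with ⟨i, hi⟩
    rcases pv_nodeIndex_get? nl x i hi with ⟨k, rfl, hk, hxk⟩
    have hgd : (pvNodeIndex nl).getD x 0 = (k : Int) := by
      rw [PySem.Dict.getD_eq_get?_getD, hi]; rfl
    rw [hgd, PySem.List.pySetD_natCast]
    apply pv_ext
    · rw [List.length_set, pvLab_length, pvLab_length]
    · intro j hj
      rw [List.length_set, pvLab_length] at hj
      rw [pv_getD_set _ _ _ _ (by rw [pvLab_length]; exact hk)]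
      rw [pvLab_getD nl m j hj, pvLab_getD nl _ j hj]
      by_cases hjk : k = j
      · subst hjk
        rw [if_pos rfl, hxk]
        rw [if_pos ⟨hi, by rw [PySem.Dict.contains_insert]; simp⟩, PySem.Dict.getD_insert_self]
      · rw [if_neg hjk]
        by_cases hx : nl.getD j 0 = x
        · rw [hx, hi]
          rw [if_neg (by rintro ⟨h1, -⟩; exact hjk (by exact_mod_cast Option.some.inj h1)),
              if_neg (by rintro ⟨h1, -⟩; exact hjk (by exact_mod_cast Option.some.inj h1))]
        · have hx' : nl[j]?.getD 0 ≠ x := hx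
          rw [PySem.Dict.getD_insert, PySem.Dict.contains_insert]
          simp [hx']
  · rw [if_neg hc]
    apply pv_ext
    · rw [pvLab_length, pvLab_length]
    · intro j hj
      rw [pvLab_length] at hj
      have hne : nl.getD j 0 ≠ x := by
        intro he
        rw [pv_nodeIndex_contains] at hc
        have hmem : x ∈ nl := by
          rw [← he, List.getD_eq_getElem nl 0 hj]; exact List.getElem_mem hj
        simp [hmem] at hc
      have hne' : nl[j]?.getD 0 ≠ x := hne
      rw [pvLab_getD nl m j hj, pvLab_getD nl _ j hj]
      rw [PySem.Dict.getD_insert, PySem.Dict.contains_insert]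
      simp [hne']

lemma pv_foldA (nl : List Int) (ps : List (Int × Int)) (m : PySem.Dict Int Int) :
    ps.foldl (fun labels q =>
        if (pvNodeIndex nl).contains q.2 then
          PySem.List.pySetD labels ((pvNodeIndex nl).getD q.2 0) q.1
        else labels) (pvLab nl m)
      = pvLab nl (ps.foldl (fun m q => m.insert q.2 q.1) m) := by
  induction ps generalizing m with
  | nil => rfl
  | cons q t ih => simp only [List.foldl_cons, pv_stepA nl m q.1 q.2, ih]

-- length is preserved by B's loop
lemma pv_lenB (M : PySem.Dict Int Int) (ps : List (Int × Int)) (labels : List Int) :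
    (ps.foldl (fun labels p =>
        if M.contains p.1 then PySem.List.pySetD labels p.2 (M.getD p.1 0) else labels) labels).length
      = labels.length := by
  induction ps generalizing labels with
  | nil => rfl
  | cons p t ih =>
    rw [List.foldl_cons, ih]
    split
    · exact PySem.List.length_pySetD _ _ _
    · rfl

-- pointwise value of B's loop over valid index pairs
lemma pv_foldB (nl : List Int) (M : PySem.Dict Int Int) (ps : List (Int × Int))
    (hps : ∀ p ∈ ps, (pvNodeIndex nl).get? p.1 = some p.2)
    (hdis : ps.Pairwise (fun a b => a.2 ≠ b.2))
    (labels : List Int) (hlen : labels.length = nl.length) (j : Nat) (hj : j < nl.length) :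
    (ps.foldl (fun labels p =>
        if M.contains p.1 then PySem.List.pySetD labels p.2 (M.getD p.1 0) else labels) labels).getD j 0
      = if (nl.getD j 0, (j : Int)) ∈ ps ∧ M.contains (nl.getD j 0) = true
        then M.getD (nl.getD j 0) 0 else labels.getD j 0 := by
  induction ps generalizing labels with
  | nil => simp
  | cons p t ih =>
    obtain ⟨px, pi⟩ := p
    have hp := hps _ (List.mem_cons_self ..)
    rcases pv_nodeIndex_get? nl px pi hp with ⟨k, rfl, hk, hxk⟩
    simp only [List.foldl_cons]
    set L' := (if M.contains px then PySem.List.pySetD labels ((k : Nat) : Int) (M.getD px 0) else labels) with hL'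
    have hlen' : L'.length = nl.length := by
      rw [hL']; split
      · rw [PySem.List.length_pySetD]; exact hlen
      · exact hlen
    rw [ih (fun q hq => hps q (List.mem_cons_of_mem _ hq)) hdis.tail L' hlen']
    by_cases hmem : (nl.getD j 0, (j : Int)) ∈ t ∧ M.contains (nl.getD j 0) = true
    · rw [if_pos hmem, if_pos ⟨List.mem_cons_of_mem _ hmem.1, hmem.2⟩]
    · rw [if_neg hmem]
      by_cases hkj : k = j
      · subst hkj
        by_cases hcon : M.contains (nl.getD k 0) = true
        · have hval : L'.getD k 0 = M.getD (nl.getD k 0) 0 := by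
            rw [hL', if_pos (hxk ▸ hcon), PySem.List.pySetD_natCast,
                pv_getD_set _ _ _ _ (hlen ▸ hk), if_pos rfl, hxk]
          rw [hval, if_pos ⟨by rw [hxk]; exact List.mem_cons_self .., hcon⟩]
        · have hval : L' = labels := by
            rw [hL', if_neg (by rw [← hxk]; exact hcon)]
          rw [hval, if_neg (by rintro ⟨-, h⟩; exact hcon h)]
      · have hcond : ¬((nl.getD j 0, (j : Int)) ∈ (px, ((k : Nat) : Int)) :: t ∧ M.contains (nl.getD j 0) = true) := by
          rintro ⟨hin, hcon⟩
          rcases List.mem_cons.mp hin with he | hin2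
          · have h2 : ((k : Nat) : Int) = (j : Int) := (congrArg Prod.snd he).symm
            exact hkj (by exact_mod_cast h2)
          · exact hmem ⟨hin2, hcon⟩
        rw [if_neg hcond, hL']
        split
        · rw [PySem.List.pySetD_natCast, pv_getD_set _ _ _ _ (hlen ▸ hk), if_neg hkj]
        · rfl

lemma pv_items_valid (nl : List Int) :
    ∀ p ∈ (pvNodeIndex nl).items, (pvNodeIndex nl).get? p.1 = some p.2 := by
  intro p hp
  exact PySem.Dict.get?_of_mem_items _ hp (pv_nodeIndex_nodup nl)

lemma pv_items_dis (nl : List Int) :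
    (pvNodeIndex nl).items.Pairwise (fun a b => a.2 ≠ b.2) := by
  have hnd : (pvNodeIndex nl).items.Nodup := by
    have := pv_nodeIndex_nodup nl
    rw [PySem.Dict.keys] at this
    exact this.of_map _
  refine hnd.imp_of_mem ?_
  intro a b ha hb hne he
  apply hne
  have hga := pv_items_valid nl a ha
  have hgb := pv_items_valid nl b hb
  rcases pv_nodeIndex_get? nl a.1 a.2 hga with ⟨k1, hk1, hlt1, hv1⟩
  rcases pv_nodeIndex_get? nl b.1 b.2 hgb with ⟨k2, hk2, hlt2, hv2⟩
  have hkk : k1 = k2 := by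
    have h3 : ((k1 : Nat) : Int) = (k2 : Nat) := by rw [← hk1, ← hk2]; exact he
    exact_mod_cast h3
  have h1 : a.1 = b.1 := by rw [← hv1, ← hv2, hkk]
  exact Prod.ext h1 he

-- A's result, rewritten through pvLab
lemma pv_A_eq (nl : List Int) (cd : List (Int × List Int)) :
    convert_to_labels nl cd = pvLab nl
      (((PySem.Dict.ofList cd).items.flatMap (fun p => p.2.map (fun x => (p.1, x)))).foldl
        (fun m q => m.insert q.2 q.1) PySem.Dict.empty) := by
  show (PySem.Dict.ofList cd).items.foldl _ _ = _
  rw [show (List.replicate nl.length (-1 : Int)) = pvLab nl PySem.Dict.empty from (pvLab_empty nl).symm]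
  rw [pv_foldl_nested ((PySem.Dict.ofList cd).items)
      (f := fun labels (q : Int × Int) =>
        if (pvNodeIndex nl).contains q.2 then
          PySem.List.pySetD labels ((pvNodeIndex nl).getD q.2 0) q.1
        else labels)]
  exact pv_foldA nl _ _

-- ===== VERDICT (by name: the statement is the Claim_ definition above) =====
theorem convert_to_labels_spec : Claim_equal_convert_to_labels := by
  intro nl cd _
  unfold Spec_convert_to_labels
  rw [pv_A_eq]
  set M := (((PySem.Dict.ofList cd).items.flatMap (fun p => p.2.map (fun x => (p.1, x)))).foldl
      (fun m q => m.insert q.2 q.1) PySem.Dict.empty) with hM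
  have hB : convert_to_labels_alt nl cd =
      (pvNodeIndex nl).items.foldl (fun labels p =>
        if M.contains p.1 then PySem.List.pySetD labels p.2 (M.getD p.1 0) else labels)
        (List.replicate nl.length (-1 : Int)) := by
    show (pvNodeIndex nl).items.foldl _ _ = _
    rw [pv_foldl_nested ((PySem.Dict.ofList cd).items)
        (f := fun (m : PySem.Dict Int Int) (q : Int × Int) => m.insert q.2 q.1)]
  rw [hB]
  apply pv_ext
  · rw [pvLab_length, pv_lenB, List.length_replicate]
  · intro j hj
    rw [pvLab_length] at hj
    rw [pvLab_getD nl M j hj,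
        pv_foldB nl M _ (pv_items_valid nl) (pv_items_dis nl) _ List.length_replicate j hj]
    by_cases hmem : ((nl.getD j 0, (j : Int)) ∈ (pvNodeIndex nl).items ∧ M.contains (nl.getD j 0) = true)
    · rw [if_pos ⟨PySem.Dict.get?_of_mem_items _ hmem.1 (pv_nodeIndex_nodup nl), hmem.2⟩, if_pos hmem]
    · rw [if_neg hmem, if_neg (by
        rintro ⟨h1, h2⟩
        exact hmem ⟨PySem.Dict.mem_items_of_get?_eq_some _ h1, h2⟩)]
      simp [List.getD_eq_getElem?_getD, hj]
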